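-- pv_equiv track=rewrite | github.com/aidanq52/ONE-seq_fragment_generation | barcode_generator/Barcode_generator_bk.py | increment_barcode
-- ===== SOURCE A (Python) =====
-- def increment_barcode(barcode):
--     bases = ['A', 'C', 'G', 'T']
--     base_to_idx = {b: i for i, b in enumerate(bases)}
--     idx_to_base = {i: b for i, b in enumerate(bases)}
--     chars = list(barcode)
--     pos = len(chars) - 1
--     while pos >= 0:
--         current_idx = base_to_idx[chars[pos]]
--         if current_idx == 3:
--             chars[pos] = 'A'
--             pos -= 1
--         else:
--             chars[pos] = idx_to_base[current_idx + 1]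
--             break
--     if pos < 0:
--         return None
--     return ''.join(chars)
-- ===== SOURCE B (Python) =====
-- def increment_barcode(barcode):
--     stripped = barcode.rstrip('T')
--     if not stripped:
--         return None
--     order = {'A': 'C', 'C': 'G', 'G': 'T'}
--     inc = order[stripped[-1]]  # KeyError on an invalid base, as in A
--     return stripped[:-1] + inc + 'A' * (len(barcode) - len(stripped))
-- ===== Notes on version B (the rewrite author's own statement) =====
-- stated objective: simpler
-- what changed: Replaces the explicit index-decrementing carry loop over a mutable char list by rstrip('T') + a slice + a successor map on the last non-T base, with 'A'*trailing rebuilt in one step.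
import Mathlib
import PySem

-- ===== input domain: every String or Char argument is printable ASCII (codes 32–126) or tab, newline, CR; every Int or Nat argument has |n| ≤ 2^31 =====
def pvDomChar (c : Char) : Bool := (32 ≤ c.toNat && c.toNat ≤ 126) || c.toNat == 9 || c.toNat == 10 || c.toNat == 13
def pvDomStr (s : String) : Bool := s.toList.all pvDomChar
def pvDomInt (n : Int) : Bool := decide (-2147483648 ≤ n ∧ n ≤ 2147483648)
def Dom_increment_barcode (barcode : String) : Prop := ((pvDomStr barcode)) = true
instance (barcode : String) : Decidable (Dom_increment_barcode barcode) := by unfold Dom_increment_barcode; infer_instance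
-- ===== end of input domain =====

-- B replaces A's explicit index-decrementing carry loop by rstrip('T') + slice + a successor map (objective: simpler).

-- ===== PORT A =====
def pvBases : List Char := ['A', 'C', 'G', 'T']
-- {b: i for i, b in enumerate(bases)}
def pvBaseToIdx : PySem.Dict Char Int :=
  (PySem.List.enumerate pvBases).foldl (fun d p => d.insert p.2 p.1) PySem.Dict.empty
-- {i: b for i, b in enumerate(bases)}
def pvIdxToBase : PySem.Dict Int Char :=
  (PySem.List.enumerate pvBases).foldl (fun d p => d.insert p.1 p.2) PySem.Dict.empty

-- the 'while pos >= 0' loop, decrementing pos from the end: recursion over the reversed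
-- char list; 'acc' is the already-rewritten suffix chars[pos+1:] (T's turned into A's).
-- A dict lookup that would raise KeyError in Python returns 'none' here (outside Pre_).
def pvAloop : List Char → List Char → Option (List Char)
  | [], _ => none                         -- pos < 0: return None
  | c :: rest, acc =>
    match pvBaseToIdx.get? c with
    | none => none                        -- KeyError (excluded by Pre_)
    | some i =>
      if i == 3 then pvAloop rest ('A' :: acc)
      else
        match pvIdxToBase.get? (i + 1) with
        | none => none                    -- unreachable KeyError
        | some b => some (rest.reverse ++ b :: acc)   -- break; ''.join(chars)

def increment_barcode (barcode : String) : Option String :=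
  (pvAloop barcode.toList.reverse []).map String.ofList

-- ===== PORT B =====
def pvOrder : PySem.Dict Char Char :=
  ((PySem.Dict.empty.insert 'A' 'C').insert 'C' 'G').insert 'G' 'T'

def increment_barcode_alt (barcode : String) : Option String :=
  let cs := barcode.toList
  -- barcode.rstrip('T'): hand port, exact (drop trailing 'T's)
  let stripped := (cs.reverse.dropWhile (fun c => c == 'T')).reverse
  if stripped = [] then none
  else
    match PySem.List.pyGet? stripped (-1) with        -- stripped[-1]
    | none => none                                    -- unreachable: stripped ≠ []
    | some last =>
      match pvOrder.get? last with
      | none => none                                  -- KeyError (excluded by Pre_)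
      | some inc =>
        some (String.ofList (PySem.List.slice stripped none (some (-1)) ++
          inc :: List.replicate (cs.length - stripped.length) 'A'))

-- ===== PRECONDITION & SPEC =====
-- Pre_ excludes exactly the inputs on which A raises KeyError: those whose last
-- non-'T' character is not one of 'A','C','G' (B raises KeyError there too).
def Pre_increment_barcode (barcode : String) : Prop :=
  ((barcode.toList.reverse.dropWhile (fun c => c == 'T')).head?.all
    (fun c => c == 'A' || c == 'C' || c == 'G')) = true
instance (barcode : String) : Decidable (Pre_increment_barcode barcode) := by
  unfold Pre_increment_barcode; infer_instance

def pvWitness_increment_barcode : String := "ACGT"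

def Spec_increment_barcode (barcode : String) (out : Option String) : Prop := out = increment_barcode_alt barcode
instance (barcode : String) (out : Option String) : Decidable (Spec_increment_barcode barcode out) := by unfold Spec_increment_barcode; infer_instance

-- ===== CLAIM (what is proved, stated in full; the proofs are below) =====
def Claim_equal_increment_barcode : Prop := ∀ (barcode : String), Dom_increment_barcode barcode → Pre_increment_barcode barcode → Spec_increment_barcode barcode (increment_barcode barcode)

-- ===== LEMMAS AND PROOFS =====

-- the successor of a valid non-'T' base (proof-only abbreviation)
def pvInc (c : Char) : Char := if c = 'A' then 'C' else if c = 'C' then 'G' else 'T'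

theorem pvLookA : pvBaseToIdx.get? 'A' = some 0 := by decide
theorem pvLookC : pvBaseToIdx.get? 'C' = some 1 := by decide
theorem pvLookG : pvBaseToIdx.get? 'G' = some 2 := by decide
theorem pvLookT : pvBaseToIdx.get? 'T' = some 3 := by decide
theorem pvIdx1 : pvIdxToBase.get? 1 = some 'C' := by decide
theorem pvIdx2 : pvIdxToBase.get? 2 = some 'G' := by decide
theorem pvIdx3 : pvIdxToBase.get? 3 = some 'T' := by decide

theorem pvAloop_spec (rev : List Char) (acc : List Char)
    (h : ((rev.dropWhile (fun c => c == 'T')).head?.all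
      (fun c => c == 'A' || c == 'C' || c == 'G')) = true) :
    pvAloop rev acc =
      match rev.dropWhile (fun c => c == 'T') with
      | [] => none
      | c :: rest =>
        some (rest.reverse ++ pvInc c ::
          (List.replicate (rev.takeWhile (fun c => c == 'T')).length 'A' ++ acc)) := by
  induction rev generalizing acc with
  | nil => simp [pvAloop]
  | cons c rest ih =>
    by_cases hc : c = 'T'
    · subst hc
      have hdrop : (('T' :: rest).dropWhile (fun c => c == 'T')) =
          rest.dropWhile (fun c => c == 'T') := by simp
      have htake : (('T' :: rest).takeWhile (fun c => c == 'T')) =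
          'T' :: rest.takeWhile (fun c => c == 'T') := by simp
      rw [hdrop] at h ⊢
      rw [htake]
      have := ih ('A' :: acc) h
      rw [show pvAloop ('T' :: rest) acc = pvAloop rest ('A' :: acc) from by
        simp [pvAloop, pvLookT], this]
      cases hd : rest.dropWhile (fun c => c == 'T') with
      | nil => rfl
      | cons d ds => simp [List.replicate_succ']
    · have hcb : (c == 'T') = false := by simpa using hc
      have hdrop : ((c :: rest).dropWhile (fun c => c == 'T')) = c :: rest := by
        simp [hcb]
      have htake : ((c :: rest).takeWhile (fun c => c == 'T')) = [] := by
        simp [hcb]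
      rw [hdrop] at h ⊢
      rw [htake]
      simp only [Option.all_some, List.head?_cons] at h
      have hc3 : c = 'A' ∨ c = 'C' ∨ c = 'G' := by
        rcases Bool.or_eq_true_iff.mp h with h' | h'
        · rcases Bool.or_eq_true_iff.mp h' with h'' | h''
          · exact Or.inl (by simpa using h'')
          · exact Or.inr (Or.inl (by simpa using h''))
        · exact Or.inr (Or.inr (by simpa using h'))
      rcases hc3 with rfl | rfl | rfl <;>
        simp [pvAloop, pvLookA, pvLookC, pvLookG, pvIdx1, pvIdx2, pvIdx3, pvInc]

theorem pvOrder_eq (c : Char) (h : (c == 'A' || c == 'C' || c == 'G') = true) :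
    pvOrder.get? c = some (pvInc c) := by
  rcases Bool.or_eq_true_iff.mp h with h' | h'
  · rcases Bool.or_eq_true_iff.mp h' with h'' | h''
    · rw [show c = 'A' from by simpa using h'']; decide
    · rw [show c = 'C' from by simpa using h'']; decide
  · rw [show c = 'G' from by simpa using h']; decide

theorem increment_barcode_spec : Claim_equal_increment_barcode := by
  intro barcode _ hpre
  unfold Spec_increment_barcode
  unfold Pre_increment_barcode at hpre
  unfold increment_barcode increment_barcode_alt
  rw [pvAloop_spec _ [] hpre]
  cases hd : barcode.toList.reverse.dropWhile (fun c => c == 'T') with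
  | nil => simp [hd]
  | cons c rest =>
    rw [hd] at hpre
    simp only [List.head?_cons, Option.all_some] at hpre
    have hlen : barcode.toList.length =
        (barcode.toList.reverse.takeWhile (fun c => c == 'T')).length + (rest.length + 1) := by
      have := congrArg List.length
        (List.takeWhile_append_dropWhile (p := fun c => c == 'T') (l := barcode.toList.reverse))
      rw [hd] at this
      simpa [Nat.add_comm] using this.symm
    simp only [hd, List.reverse_cons]
    rw [if_neg (by simp : ¬ (rest.reverse ++ [c] = []))]
    rw [show PySem.List.pyGet? (rest.reverse ++ [c]) (-1) = some c from by simp [pysem]]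
    simp [pvOrder_eq c hpre, PySem.List.slice_to_neg_one, hlen]
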